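-- pv_equiv track=rewrite | github.com/jackuboot/RAG-for-Design-Drawings | qa.py | doc_has_sheet_or_alias
-- ===== SOURCE A (Python) =====
-- COVER_SHEET_ALIASES = {
--     "A1.0", "A0.0", "A0.1", "A-000", "A001", "A-001", "T1", "T-1",
--     "G-001", "G001", "SD1", "COVER", "TITLE"
-- }
--
-- def is_cover_like(code: str) -> bool:
--     up = code.upper()
--     return up.startswith("A0") or up in COVER_SHEET_ALIASES or up == "A1.0"
--
-- def expand_sheet_aliases(sheet_code: str) -> set[str]:
--     up = sheet_code.upper()
--     return {up} | (COVER_SHEET_ALIASES if is_cover_like(up) else set())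
--
-- def doc_has_sheet_or_alias(sheet_code: str, chunks) -> bool:
--     if not sheet_code:
--         return True
--     aliases = {a.replace(" ", "") for a in expand_sheet_aliases(sheet_code)}
--     for c in chunks:
--         sid = (c.get("sheet_id") or "").upper().replace(" ", "")
--         if sid in aliases:
--             return True
--     up_aliases = expand_sheet_aliases(sheet_code)
--     for c in chunks:
--         up = (c.get("text","") or "").upper()
--         if any(a in up for a in up_aliases):
--             return True
--     return False
-- ===== SOURCE B (Python) =====
-- COVER_ALIAS_LIST = [
--     "A1.0", "A0.0", "A0.1", "A-000", "A001", "A-001", "T1", "T-1",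
--     "G-001", "G001", "SD1", "COVER", "TITLE"
-- ]
--
-- def doc_has_sheet_or_alias(sheet_code, chunks):
--     if not sheet_code:
--         return True
--     up = sheet_code.upper()
--     cover_like = up.startswith("A0") or up in COVER_ALIAS_LIST or up == "A1.0"
--     alias_list = [up] + (COVER_ALIAS_LIST if cover_like else [])
--     norm = [a.replace(" ", "") for a in alias_list]
--     for c in chunks:
--         sid = (c.get("sheet_id") or "").upper().replace(" ", "")
--         if sid in norm:
--             return True
--         text = (c.get("text", "") or "").upper()
--         if any(a in text for a in alias_list):
--             return True
--     return False
-- ===== Notes on version B (the rewrite author's own statement) =====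
-- stated objective: simpler
-- what changed: A builds two alias sets via helper calls and scans the chunk list twice (one full pass over sheet_ids, then a second full pass over texts); B inlines the cover-likeness test, precomputes one alias list plus its space-stripped normal form, and makes a single pass over the chunks checking both the sheet_id membership and the text substring condition per chunk.
import Mathlib
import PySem

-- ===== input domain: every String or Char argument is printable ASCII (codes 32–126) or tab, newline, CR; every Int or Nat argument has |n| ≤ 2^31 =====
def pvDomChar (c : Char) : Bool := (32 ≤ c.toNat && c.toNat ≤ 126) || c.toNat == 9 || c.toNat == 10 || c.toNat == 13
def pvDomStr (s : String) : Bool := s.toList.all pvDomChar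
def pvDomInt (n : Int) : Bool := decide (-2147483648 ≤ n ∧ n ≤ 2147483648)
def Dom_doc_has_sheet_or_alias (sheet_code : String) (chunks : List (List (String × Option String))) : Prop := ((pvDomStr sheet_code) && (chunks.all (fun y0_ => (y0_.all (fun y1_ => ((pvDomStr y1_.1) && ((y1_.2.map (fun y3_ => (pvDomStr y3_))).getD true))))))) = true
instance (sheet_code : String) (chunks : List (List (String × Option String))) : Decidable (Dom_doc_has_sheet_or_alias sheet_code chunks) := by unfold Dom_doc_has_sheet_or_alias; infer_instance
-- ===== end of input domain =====

-- B merges A's two sequential scans over `chunks` into one pass with list-based alias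
-- collections (objective: simpler decomposition; same return value).

-- ===== PORT A =====
def COVER_SHEET_ALIASES : PySem.Set String :=
  PySem.Set.ofList ["A1.0", "A0.0", "A0.1", "A-000", "A001", "A-001", "T1", "T-1",
    "G-001", "G001", "SD1", "COVER", "TITLE"]

def is_cover_like (code : String) : Bool :=
  let up := PySem.Str.upper code
  PySem.Str.startswith up "A0" || PySem.Set.contains COVER_SHEET_ALIASES up || (up == "A1.0")

def expand_sheet_aliases (sheet_code : String) : PySem.Set String :=
  let up := PySem.Str.upper sheet_code
  PySem.Set.union (PySem.Set.ofList [up])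
    (if is_cover_like up then COVER_SHEET_ALIASES else PySem.Set.empty)

def doc_has_sheet_or_alias (sheet_code : String) (chunks : List (List (String × Option String))) : Bool :=
  if sheet_code == "" then true
  else
    -- {a.replace(" ", "") for a in expand_sheet_aliases(sheet_code)}
    let aliases : PySem.Set String :=
      PySem.Set.ofList ((expand_sheet_aliases sheet_code).map (fun a => PySem.Str.replace a " " ""))
    if chunks.any (fun c =>
        -- (c.get("sheet_id") or "").upper().replace(" ", "")
        let sid := PySem.Str.replace
          (PySem.Str.upper ((((PySem.Dict.mk c).get? "sheet_id").getD none).getD "")) " " ""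
        PySem.Set.contains aliases sid) then true
    else
      let up_aliases := expand_sheet_aliases sheet_code
      if chunks.any (fun c =>
          -- (c.get("text", "") or "").upper()
          let up := PySem.Str.upper ((((PySem.Dict.mk c).get? "text").getD (some "")).getD "")
          up_aliases.any (fun a => PySem.Str.isIn a up)) then true
      else false

-- ===== PORT B =====
def COVER_ALIAS_LIST : List String :=
  ["A1.0", "A0.0", "A0.1", "A-000", "A001", "A-001", "T1", "T-1",
   "G-001", "G001", "SD1", "COVER", "TITLE"]

def doc_has_sheet_or_alias_alt (sheet_code : String) (chunks : List (List (String × Option String))) : Bool :=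
  if sheet_code == "" then true
  else
    let up := PySem.Str.upper sheet_code
    let cover_like := PySem.Str.startswith up "A0" || COVER_ALIAS_LIST.contains up || (up == "A1.0")
    let alias_list := [up] ++ (if cover_like then COVER_ALIAS_LIST else [])
    let norm := alias_list.map (fun a => PySem.Str.replace a " " "")
    chunks.any (fun c =>
      let sid := PySem.Str.replace
        (PySem.Str.upper ((((PySem.Dict.mk c).get? "sheet_id").getD none).getD "")) " " ""
      norm.contains sid ||
        (let text := PySem.Str.upper ((((PySem.Dict.mk c).get? "text").getD (some "")).getD "")
         alias_list.any (fun a => PySem.Str.isIn a text)))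

-- ===== PRECONDITION & SPEC =====
def Spec_doc_has_sheet_or_alias (sheet_code : String) (chunks : List (List (String × Option String))) (out : Bool) : Prop := out = doc_has_sheet_or_alias_alt sheet_code chunks
instance (sheet_code : String) (chunks : List (List (String × Option String))) (out : Bool) : Decidable (Spec_doc_has_sheet_or_alias sheet_code chunks out) := by unfold Spec_doc_has_sheet_or_alias; infer_instance

-- ===== CLAIM (what is proved, stated in full; the proofs are below) =====
def Claim_equal_doc_has_sheet_or_alias : Prop := ∀ (sheet_code : String) (chunks : List (List (String × Option String))), Dom_doc_has_sheet_or_alias sheet_code chunks → Spec_doc_has_sheet_or_alias sheet_code chunks (doc_has_sheet_or_alias sheet_code chunks)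

-- ===== LEMMAS AND PROOFS =====

lemma toNat_ofNat_valid (n : Nat) (h : n < 55296) : (Char.ofNat n).toNat = n := by
  unfold Char.ofNat
  rw [dif_pos (Or.inl h : Nat.isValidChar n)]
  rfl

lemma upperChar_idem (c : Char) : PySem.Chars.upperChar (PySem.Chars.upperChar c) = PySem.Chars.upperChar c := by
  simp only [PySem.Chars.upperChar, PySem.Chars.islower]
  by_cases h1 : ('a' ≤ c)
  · by_cases h2 : (c ≤ 'z')
    · have hc1 : 97 ≤ c.toNat := by
        have := Char.le_def.mp h1
        exact UInt32.le_iff_toNat_le.mp this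
      have hc2 : c.toNat ≤ 122 := by
        have := Char.le_def.mp h2
        exact UInt32.le_iff_toNat_le.mp this
      have hd : (Char.ofNat (c.toNat - 32)).toNat = c.toNat - 32 := toNat_ofNat_valid _ (by omega)
      have hno : ¬ ('a' ≤ Char.ofNat (c.toNat - 32)) := by
        intro hcon
        have := UInt32.le_iff_toNat_le.mp (Char.le_def.mp hcon)
        have h97 : (97 : Nat) ≤ (Char.ofNat (c.toNat - 32)).toNat := this
        omega
      simp [h1, h2, hno]
    · simp [h2]
  · simp [h1]

lemma upper_idem (s : String) : PySem.Str.upper (PySem.Str.upper s) = PySem.Str.upper s := by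
  simp [PySem.Str.upper, PySem.Chars.upper, List.map_map, Function.comp_def, upperChar_idem]

lemma contains_congr {l1 l2 : List String} (h : ∀ x, x ∈ l1 ↔ x ∈ l2) (y : String) :
    l1.contains y = l2.contains y := by
  rw [Bool.eq_iff_iff]
  simp [h y]

-- B's cover-likeness test equals A's (A re-uppercases an already-uppercased string).
lemma cover_eq (sc : String) :
    is_cover_like (PySem.Str.upper sc) = (PySem.Str.startswith (PySem.Str.upper sc) "A0" || COVER_ALIAS_LIST.contains (PySem.Str.upper sc) || (PySem.Str.upper sc == "A1.0")) := by
  simp only [is_cover_like, upper_idem]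
  have hcl : PySem.Set.contains COVER_SHEET_ALIASES (PySem.Str.upper sc)
      = COVER_ALIAS_LIST.contains (PySem.Str.upper sc) := by
    apply contains_congr
    intro yy
    unfold COVER_SHEET_ALIASES
    rw [PySem.Set.mem_ofList]
    exact Iff.rfl
  rw [hcl]

-- membership in A's expanded alias set = membership in B's alias list
lemma mem_expand (sc x : String) :
    x ∈ expand_sheet_aliases sc
      ↔ x ∈ ([PySem.Str.upper sc] ++ (if PySem.Str.startswith (PySem.Str.upper sc) "A0" || COVER_ALIAS_LIST.contains (PySem.Str.upper sc) || (PySem.Str.upper sc == "A1.0") then COVER_ALIAS_LIST else [])) := by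
  simp only [expand_sheet_aliases]
  rw [cover_eq]
  simp [PySem.Set.mem_union, PySem.Set.mem_ofList, COVER_SHEET_ALIASES, COVER_ALIAS_LIST, PySem.Set.empty]

lemma any_or_split {α : Type} (l : List α) (p q : α → Bool) :
    l.any (fun x => p x || q x) = (l.any p || l.any q) := by
  induction l with
  | nil => rfl
  | cons a t ih =>
    simp only [List.any_cons, ih]
    cases p a <;> cases q a <;> cases t.any p <;> cases t.any q <;> rfl

lemma any_mem_congr {α : Type} [DecidableEq α] {l1 l2 : List α} (h : ∀ x, x ∈ l1 ↔ x ∈ l2) (p : α → Bool) :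
    l1.any p = l2.any p := by
  rw [Bool.eq_iff_iff]
  simp only [List.any_eq_true]
  constructor <;> rintro ⟨x, hx, hp⟩
  · exact ⟨x, (h x).mp hx, hp⟩
  · exact ⟨x, (h x).mpr hx, hp⟩

lemma ite_ite_or (b c : Bool) : (if b = true then true else if c = true then true else false) = (b || c) := by
  cases b <;> cases c <;> simp

-- the sheet_id membership tests agree chunkwise
set_option maxHeartbeats 1000000 in
lemma contains_eq (sc y : String) :
    PySem.Set.contains (PySem.Set.ofList ((expand_sheet_aliases sc).map (fun a => PySem.Str.replace a " " ""))) y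
      = (([PySem.Str.upper sc] ++ (if PySem.Str.startswith (PySem.Str.upper sc) "A0" || COVER_ALIAS_LIST.contains (PySem.Str.upper sc) || (PySem.Str.upper sc == "A1.0") then COVER_ALIAS_LIST else [])).map (fun a => PySem.Str.replace a " " "")).contains y := by
  apply contains_congr
  intro x
  simp only [PySem.Set.mem_ofList, List.mem_map]
  constructor <;> rintro ⟨a, ha, rfl⟩
  · exact ⟨a, (mem_expand sc a).mp ha, rfl⟩
  · exact ⟨a, (mem_expand sc a).mpr ha, rfl⟩

-- the text substring tests agree chunkwise
lemma anyIn_eq (sc t : String) :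
    (expand_sheet_aliases sc).any (fun a => PySem.Str.isIn a t)
      = ([PySem.Str.upper sc] ++ (if PySem.Str.startswith (PySem.Str.upper sc) "A0" || COVER_ALIAS_LIST.contains (PySem.Str.upper sc) || (PySem.Str.upper sc == "A1.0") then COVER_ALIAS_LIST else [])).any (fun a => PySem.Str.isIn a t) := by
  apply any_mem_congr
  intro x
  exact mem_expand sc x

-- ===== VERDICT (by name: the statement is the Claim_ definition above) =====
set_option maxHeartbeats 1000000 in
theorem doc_has_sheet_or_alias_spec : Claim_equal_doc_has_sheet_or_alias := by
  intro sc chunks _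
  unfold Spec_doc_has_sheet_or_alias doc_has_sheet_or_alias doc_has_sheet_or_alias_alt
  by_cases h0 : sc == ""
  · simp [h0]
  · simp only [h0]
    rw [ite_ite_or]
    refine Eq.trans (any_or_split chunks _ _).symm ?_
    exact congrArg _ (funext fun c => by rw [contains_eq sc, anyIn_eq sc])
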